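-- pv_equiv track=rewrite | github.com/frogben/water_marking | programs/lib.py | folder_feature
-- ===== SOURCE A (Python) =====
-- def folder_feature(hashed_feature,num_LSB):
--     hashed_feature_bin=bin(int(hashed_feature,16))
--     hashed_feature_bin=hashed_feature_bin[2:]
--     hashed_feature_bin=hashed_feature_bin.rjust(128,'0')
--     hashed_feature_bin+="0000"
--     bit_list=[]
--
--     for i in range(0,len(hashed_feature_bin),num_LSB):
--         bit_list.append(hashed_feature_bin[i:i+num_LSB])
--
--     for j in range(len(bit_list)-1):
--         this_bit=int(bit_list[j],2)
--         next_bit=int(bit_list[j+1],2)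
--         exclusive_or=this_bit^next_bit
--         exclusive_or_bin=bin(exclusive_or)
--         exclusive_or_bin=exclusive_or_bin[2:]
--         exclusive_or_bin=exclusive_or_bin.rjust(num_LSB,'0')
--         bit_list[j+1]=exclusive_or_bin
--
--     return bit_list[len(bit_list)-1]
-- ===== SOURCE B (Python) =====
-- def folder_feature(hashed_feature, num_LSB):
--     s = format(int(hashed_feature, 16), '0128b') + '0000'
--     if num_LSB >= len(s):
--         return s
--     acc = cur = cnt = 0
--     for c in s:
--         cur = cur * 2 + (c == '1')
--         cnt += 1
--         if cnt == num_LSB: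
--             acc ^= cur
--             cur = cnt = 0
--     if cnt:
--         acc ^= cur
--     return format(acc, '0{}b'.format(num_LSB))
-- ===== Notes on version B (the rewrite author's own statement) =====
-- stated objective: alternative
-- what changed: B replaces A's chunk-string list plus chained parse-XOR-format-mutate passes by one streaming pass over the bit string with an integer XOR accumulator and a width counter, formatting only once at the end.
import Mathlib
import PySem

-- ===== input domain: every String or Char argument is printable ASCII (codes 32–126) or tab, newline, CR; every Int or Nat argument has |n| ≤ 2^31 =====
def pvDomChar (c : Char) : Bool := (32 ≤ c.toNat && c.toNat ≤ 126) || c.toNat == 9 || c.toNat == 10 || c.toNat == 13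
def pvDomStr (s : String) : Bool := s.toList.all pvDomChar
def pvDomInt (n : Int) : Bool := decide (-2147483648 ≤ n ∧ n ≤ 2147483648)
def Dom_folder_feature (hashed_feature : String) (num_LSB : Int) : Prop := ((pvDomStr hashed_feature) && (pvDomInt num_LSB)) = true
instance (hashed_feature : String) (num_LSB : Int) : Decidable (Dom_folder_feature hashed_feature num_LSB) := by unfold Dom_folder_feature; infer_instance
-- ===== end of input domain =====

-- B replaces A's chunk-string list and chained parse-XOR-format-mutate loop by a single streaming
-- pass with an integer XOR accumulator and width counter (objective: alternative, same cost).

-- ===== PORT A =====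
-- hand port of str.rjust(w,'0'): left-pad with '0' to width w (no-op if w ≤ len; exact for all w)
def pvRjust (cs : List Char) (w : Int) : List Char := List.replicate (w.toNat - cs.length) '0' ++ cs
-- hand port of int(x,2) (PySem's parser is private to its module): exact on nonempty '0'/'1'
-- strings, the only arguments A passes to int(·,2) under Pre_
def pvInt2 (cs : List Char) : Int := cs.foldl (fun a c => a * 2 + (if c = '1' then 1 else 0)) 0

def folder_feature (hashed_feature : String) (num_LSB : Int) : String :=
  -- int(hashed_feature, 16); none = ValueError, excluded by Pre_
  let n := (PySem.Int.ofStrBase? hashed_feature 16).getD 0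
  -- bin(n)[2:].rjust(128,'0') + "0000"
  let hb := pvRjust (PySem.List.slice (PySem.Int.toBinChars0b n) (some 2) none) 128
              ++ ['0', '0', '0', '0']
  -- for i in range(0, len(hb), num_LSB): bit_list.append(hb[i:i+num_LSB])
  let bit_list := (PySem.List.pyRange 0 (hb.length : Int) num_LSB).foldl
      (fun bl i => bl ++ [PySem.List.slice hb (some i) (some (i + num_LSB))]) []
  -- for j in range(len(bit_list)-1): bit_list[j+1] = bin(int(bl[j],2)^int(bl[j+1],2))[2:].rjust(num_LSB,'0')
  let bl2 := (PySem.List.pyRange 0 ((bit_list.length : Int) - 1) 1).foldl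
      (fun bl j =>
        bl.set (j + 1).toNat
          (pvRjust
            (PySem.List.slice
              (PySem.Int.toBinChars0b
                (PySem.Int.bxor (pvInt2 ((PySem.List.pyGet? bl j).getD []))
                  (pvInt2 ((PySem.List.pyGet? bl (j + 1)).getD [])))) (some 2) none)
            num_LSB))
      bit_list
  -- return bit_list[len(bit_list)-1]; IndexError on empty list excluded by Pre_
  String.ofList ((PySem.List.pyGet? bl2 ((bl2.length : Int) - 1)).getD [])

-- ===== PORT B =====
def folder_feature_alt (hashed_feature : String) (num_LSB : Int) : String :=
  let n := (PySem.Int.ofStrBase? hashed_feature 16).getD 0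
  -- s = format(n, '0128b') + '0000'   (0-padded format is zfill of format(n,'b'))
  let s := PySem.Chars.zfill (PySem.Int.toBinChars n) 128 ++ ['0', '0', '0', '0']
  if (s.length : Int) ≤ num_LSB then String.ofList s
  else
    -- one pass: cur = cur*2 + (c=='1'); cnt += 1; if cnt == num_LSB: acc ^= cur; cur = cnt = 0
    let st := s.foldl
      (fun (t : Int × Int × Int) c =>
        let cur := t.2.1 * 2 + (if c = '1' then 1 else 0)
        let cnt := t.2.2 + 1
        if cnt = num_LSB then (PySem.Int.bxor t.1 cur, 0, 0) else (t.1, cur, cnt))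
      (0, 0, 0)
    let acc := if st.2.2 ≠ 0 then PySem.Int.bxor st.1 st.2.1 else st.1
    -- format(acc, '0{num_LSB}b')
    String.ofList (PySem.Chars.zfill (PySem.Int.toBinChars acc) num_LSB)

-- ===== PRECONDITION & SPEC =====
-- Pre_ requires hashed_feature to parse as a NONNEGATIVE base-16 integer and num_LSB ≥ 1:
-- A raises ValueError (unparsable string, num_LSB = 0) or IndexError (num_LSB < 0) otherwise,
-- and on negative hex strings A either raises or returns a string corrupted by the 'b' of
-- bin()'s sign form ('-0b…'), a value that is not a binary string of the feature at all.
def Pre_folder_feature (hashed_feature : String) (num_LSB : Int) : Prop :=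
  0 ≤ (PySem.Int.ofStrBase? hashed_feature 16).getD (-1) ∧ 1 ≤ num_LSB
instance (hashed_feature : String) (num_LSB : Int) : Decidable (Pre_folder_feature hashed_feature num_LSB) := by
  unfold Pre_folder_feature; infer_instance

def pvWitness_folder_feature : String × Int := ("3f9c", 5)

def Spec_folder_feature (hashed_feature : String) (num_LSB : Int) (out : String) : Prop :=
  out = folder_feature_alt hashed_feature num_LSB
instance (hashed_feature : String) (num_LSB : Int) (out : String) : Decidable (Spec_folder_feature hashed_feature num_LSB out) := by
  unfold Spec_folder_feature; infer_instance

-- ===== CLAIM (what is proved, stated in full; the proofs are below) =====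
def Claim_equal_folder_feature : Prop := ∀ (hashed_feature : String) (num_LSB : Int), Dom_folder_feature hashed_feature num_LSB → Pre_folder_feature hashed_feature num_LSB → Spec_folder_feature hashed_feature num_LSB (folder_feature hashed_feature num_LSB)

-- ===== LEMMAS AND PROOFS =====

-- the binary-accumulation step shared by pvInt2 and B's streaming pass
def pvBinF : Int → Char → Int := fun a c => a * 2 + (if c = '1' then 1 else 0)

-- A's per-step reformat bin(x)[2:].rjust(k,'0')
def pvFmt (k x : Int) : List Char :=
  pvRjust (PySem.List.slice (PySem.Int.toBinChars0b x) (some 2) none) k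

-- the chunk decomposition A's first loop builds (chunk size k'+1)
def pvChunks (k' : Nat) : List Char → List (List Char)
  | [] => []
  | c :: rest => (c :: rest.take k') :: pvChunks k' (rest.drop k')
termination_by s => s.length
decreasing_by simp

-- the list A's mutation loop produces from position j on, and its last element
def pvChain (k : Int) : List Char → List (List Char) → List (List Char)
  | c, [] => [c]
  | c, d :: t => c :: pvChain k (pvFmt k (PySem.Int.bxor (pvInt2 c) (pvInt2 d))) t

def pvChainLast (k : Int) : List Char → List (List Char) → List Char
  | c, [] => c
  | c, d :: t => pvChainLast k (pvFmt k (PySem.Int.bxor (pvInt2 c) (pvInt2 d))) t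

-- ---- basic facts ----

theorem pvBinF_nonneg (v : Int) (hv : 0 ≤ v) (cs : List Char) : 0 ≤ cs.foldl pvBinF v := by
  induction cs generalizing v with
  | nil => simpa using hv
  | cons c cs ih =>
    simp only [List.foldl_cons]
    exact ih _ (by simp only [pvBinF]; split_ifs <;> omega)

theorem pvInt2_nonneg (cs : List Char) : 0 ≤ pvInt2 cs := pvBinF_nonneg 0 le_rfl cs

theorem pvBxor_nonneg {a b : Int} (ha : 0 ≤ a) (hb : 0 ≤ b) : 0 ≤ PySem.Int.bxor a b := by
  simp only [PySem.Int.bxor, if_pos ha, if_pos hb]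
  exact Int.natCast_nonneg _

theorem pvBxor_zero_left {b : Int} (hb : 0 ≤ b) : PySem.Int.bxor 0 b = b := by
  simp only [PySem.Int.bxor, le_refl, if_pos, if_pos hb, Int.toNat_zero, Nat.zero_xor]
  omega

-- ---- Nat.toDigits facts ----

theorem pvToDigitsCore_append : ∀ (f m : Nat) (acc : List Char),
    Nat.toDigitsCore 2 f m acc = Nat.toDigitsCore 2 f m [] ++ acc := by
  intro f
  induction f with
  | zero => intro m acc; simp [Nat.toDigitsCore]
  | succ f ih =>
    intro m acc
    simp only [Nat.toDigitsCore]
    by_cases h : m / 2 = 0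
    · simp [h]
    · simp only [if_neg h]
      rw [ih (m / 2) ((m % 2).digitChar :: acc), ih (m / 2) [(m % 2).digitChar]]
      simp

theorem pvBinVal_toDigitsCore : ∀ (f m : Nat), m < f →
    (Nat.toDigitsCore 2 f m []).foldl pvBinF 0 = (m : Int) := by
  intro f
  induction f with
  | zero => intro m hm; omega
  | succ f ih =>
    intro m hm
    simp only [Nat.toDigitsCore]
    by_cases h : m / 2 = 0
    · have hm2 : m = 0 ∨ m = 1 := by omega
      rcases hm2 with rfl | rfl <;> simp [pvBinF, Nat.digitChar]
    · simp only [if_neg h]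
      have hm' : m / 2 < f := by omega
      rw [pvToDigitsCore_append f (m / 2) [(m % 2).digitChar], List.foldl_append,
        ih (m / 2) hm']
      have h2 : m % 2 = 0 ∨ m % 2 = 1 := by omega
      rcases h2 with h2 | h2
      · rw [h2, show Nat.digitChar 0 = '0' from rfl]
        simp only [List.foldl_cons, List.foldl_nil, pvBinF, Char.reduceEq, reduceIte]
        omega
      · rw [h2, show Nat.digitChar 1 = '1' from rfl]
        simp only [List.foldl_cons, List.foldl_nil, pvBinF, reduceIte]
        omega

theorem pvMem_toDigitsCore : ∀ (f m : Nat) (c : Char), c ∈ Nat.toDigitsCore 2 f m [] →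
    c = '0' ∨ c = '1' := by
  intro f
  induction f with
  | zero => intro m c hc; simp [Nat.toDigitsCore] at hc
  | succ f ih =>
    intro m c hc
    simp only [Nat.toDigitsCore] at hc
    have hdig : (m % 2).digitChar = '0' ∨ (m % 2).digitChar = '1' := by
      have h2 : m % 2 = 0 ∨ m % 2 = 1 := by omega
      rcases h2 with h2 | h2 <;> simp [h2, Nat.digitChar]
    by_cases h : m / 2 = 0
    · simp only [if_pos h, List.mem_singleton] at hc
      subst hc; exact hdig
    · simp only [if_neg h] at hc
      rw [pvToDigitsCore_append f (m / 2) [(m % 2).digitChar], List.mem_append,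
        List.mem_singleton] at hc
      rcases hc with hc | rfl
      · exact ih (m / 2) c hc
      · exact hdig

theorem pvToDigitsCore_ne_nil : ∀ (f m : Nat), 0 < f → Nat.toDigitsCore 2 f m [] ≠ [] := by
  intro f m hf
  cases f with
  | zero => omega
  | succ f =>
    simp only [Nat.toDigitsCore]
    by_cases h : m / 2 = 0
    · simp [h]
    · simp only [if_neg h]
      rw [pvToDigitsCore_append f (m / 2) [(m % 2).digitChar]]
      simp

theorem pvBinVal_toDigits (m : Nat) : (Nat.toDigits 2 m).foldl pvBinF 0 = (m : Int) :=
  pvBinVal_toDigitsCore (m + 1) m (Nat.lt_succ_self m)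

theorem pvToBinChars_of_nonneg {x : Int} (hx : 0 ≤ x) :
    PySem.Int.toBinChars x = Nat.toDigits 2 x.toNat := by
  simp [PySem.Int.toBinChars, not_lt.mpr hx, Nat.toDigits]

theorem pvSlice2_toBinChars0b {x : Int} (hx : 0 ≤ x) :
    PySem.List.slice (PySem.Int.toBinChars0b x) (some 2) none = PySem.Int.toBinChars x := by
  rw [PySem.List.slice_from]
  · simp [PySem.Int.toBinChars0b, PySem.Int.toBinChars, not_lt.mpr hx]
  · norm_num

theorem pvRjust_eq_zfill (cs : List Char) (w : Int)
    (h : ∀ c ∈ cs, c = '0' ∨ c = '1') (hne : cs ≠ []) :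
    pvRjust cs w = PySem.Chars.zfill cs w := by
  cases cs with
  | nil => exact absurd rfl hne
  | cons c rest =>
    have hc := h c List.mem_cons_self
    have hsign : ¬(c = '+' ∨ c = '-') := by rcases hc with rfl | rfl <;> decide
    simp only [PySem.Chars.zfill, pvRjust]
    by_cases hw : w ≤ ((c :: rest).length : Int)
    · rw [if_pos hw]
      simp only [List.length_cons] at hw ⊢
      rw [show w.toNat - (rest.length + 1) = 0 from by omega]
      simp
    · rw [if_neg hw, if_neg hsign]

theorem pvBinVal_replicate (z : Nat) : (List.replicate z '0').foldl pvBinF 0 = 0 := by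
  induction z with
  | zero => rfl
  | succ z ih => simpa [List.replicate_succ, pvBinF] using ih

theorem pvInt2_rjust_toBinChars {x : Int} (hx : 0 ≤ x) (w : Int) :
    pvInt2 (pvRjust (PySem.Int.toBinChars x) w) = x := by
  show (pvRjust (PySem.Int.toBinChars x) w).foldl pvBinF 0 = x
  rw [pvRjust, List.foldl_append, pvBinVal_replicate, pvToBinChars_of_nonneg hx,
    pvBinVal_toDigits]
  omega

theorem pvInt2_pvFmt {x : Int} (hx : 0 ≤ x) (k : Int) : pvInt2 (pvFmt k x) = x := by
  rw [pvFmt, pvSlice2_toBinChars0b hx, pvInt2_rjust_toBinChars hx]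

theorem pvFmt_eq_zfill {x : Int} (hx : 0 ≤ x) (k : Int) :
    pvFmt k x = PySem.Chars.zfill (PySem.Int.toBinChars x) k := by
  rw [pvFmt, pvSlice2_toBinChars0b hx]
  refine pvRjust_eq_zfill _ _ ?_ ?_
  · rw [pvToBinChars_of_nonneg hx]
    exact pvMem_toDigitsCore _ _
  · rw [pvToBinChars_of_nonneg hx]
    exact pvToDigitsCore_ne_nil _ _ (Nat.succ_pos _)

-- ---- pyRange with a positive step ----

theorem pvPyRange_pos_nil {a b step : Int} (hs : 0 < step) (h : b ≤ a) :
    PySem.List.pyRange a b step = [] := by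
  rw [PySem.List.pyRange_of_pos a b hs, if_neg (not_lt.mpr h)]
  simp

theorem pvPyRange_pos_cons {a b step : Int} (hs : 0 < step) (h : a < b) :
    PySem.List.pyRange a b step = a :: PySem.List.pyRange (a + step) b step := by
  rw [PySem.List.pyRange_of_pos a b hs, PySem.List.pyRange_of_pos (a + step) b hs,
    if_pos h]
  by_cases h2 : a + step < b
  · rw [if_pos h2]
    have key : (b - a + step - 1) / step = (b - (a + step) + step - 1) / step + 1 := by
      have : b - a + step - 1 = (b - (a + step) + step - 1) + 1 * step := by ring
      rw [this, Int.add_mul_ediv_right _ _ (by omega)]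
    have hnn : 0 ≤ (b - (a + step) + step - 1) / step :=
      Int.ediv_nonneg (by omega) (by omega)
    rw [key]
    rw [show ((b - (a + step) + step - 1) / step + 1).toNat
        = ((b - (a + step) + step - 1) / step).toNat + 1 by omega]
    rw [List.range_succ_eq_map]
    simp only [List.map_cons, List.map_map, Nat.cast_zero, mul_zero, add_zero,
      List.cons.injEq, true_and]
    apply List.map_congr_left
    intro x _
    simp [Function.comp, Nat.succ_eq_add_one]
    ring
  · rw [if_neg h2]
    have key : (b - a + step - 1) / step = 1 := by
      have e : b - a + step - 1 = (b - a - 1) + 1 * step := by ring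
      rw [e, Int.add_mul_ediv_right _ _ (by omega),
        Int.ediv_eq_zero_of_lt (by omega) (by omega)]
      norm_num
    simp [key]

-- ---- A's first loop builds pvChunks ----

theorem pvChunks_fold (hb : List Char) (k : Int) (hk : 1 ≤ k) :
    ∀ (i : Nat) (acc : List (List Char)),
    (PySem.List.pyRange (i : Int) (hb.length : Int) k).foldl
        (fun bl j => bl ++ [PySem.List.slice hb (some j) (some (j + k))]) acc
      = acc ++ pvChunks (k.toNat - 1) (hb.drop i) := by
  have main : ∀ (n i : Nat), hb.length - i ≤ n → ∀ acc : List (List Char),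
      (PySem.List.pyRange (i : Int) (hb.length : Int) k).foldl
          (fun bl j => bl ++ [PySem.List.slice hb (some j) (some (j + k))]) acc
        = acc ++ pvChunks (k.toNat - 1) (hb.drop i) := by
    intro n
    induction n with
    | zero =>
      intro i hi acc
      rw [pvPyRange_pos_nil (by omega) (by omega)]
      rw [List.drop_eq_nil_of_le (by omega)]
      simp [pvChunks]
    | succ n ih =>
      intro i hi acc
      by_cases hlt : i < hb.length
      · rw [pvPyRange_pos_cons (by omega) (by omega), List.foldl_cons]
        rw [PySem.List.slice_toNat hb (a := (i : Int)) (b := (i : Int) + k)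
          (by omega) (by omega)]
        rw [show ((i : Int)).toNat = i from by omega,
          show ((i : Int) + k).toNat = i + k.toNat from by omega,
          show i + k.toNat - i = k.toNat from by omega]
        rw [show (i : Int) + k = ((i + k.toNat : Nat) : Int) from by push_cast; omega]
        rw [ih (i + k.toNat) (by omega)]
        obtain ⟨c, rest, hcr⟩ : ∃ c rest, hb.drop i = c :: rest := by
          cases h : hb.drop i with
          | nil => exact absurd (List.drop_eq_nil_iff.mp h) (by omega)
          | cons c rest => exact ⟨c, rest, rfl⟩
        have hdd : hb.drop (i + k.toNat) = rest.drop (k.toNat - 1) := by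
          have h1 : (hb.drop i).drop k.toNat = hb.drop (i + k.toNat) := by
            rw [List.drop_drop]
          rw [← h1, hcr, show k.toNat = (k.toNat - 1) + 1 from by omega,
            List.drop_succ_cons, Nat.add_sub_cancel]
        rw [hcr, hdd]
        rw [show List.take k.toNat (c :: rest) = c :: List.take (k.toNat - 1) rest from by
          rw [show k.toNat = (k.toNat - 1) + 1 from by omega, List.take_succ_cons,
            Nat.add_sub_cancel]]
        rw [show pvChunks (k.toNat - 1) (c :: rest)
            = (c :: rest.take (k.toNat - 1)) :: pvChunks (k.toNat - 1) (rest.drop (k.toNat - 1))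
          from by rw [pvChunks]]
        simp
      · rw [pvPyRange_pos_nil (by omega) (by omega)]
        rw [List.drop_eq_nil_of_le (by omega)]
        simp [pvChunks]
  exact fun i acc => main (hb.length - i) i le_rfl acc

-- ---- A's second loop produces pvChain ----

theorem pvLoop_go (k : Int) :
    ∀ (rest pre : List (List Char)) (c : List Char),
    (PySem.List.pyRange (pre.length : Int) ((pre.length : Int) + (rest.length : Int)) 1).foldl
      (fun bl j =>
        bl.set (j + 1).toNat
          (pvRjust
            (PySem.List.slice
              (PySem.Int.toBinChars0b
                (PySem.Int.bxor (pvInt2 ((PySem.List.pyGet? bl j).getD []))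
                  (pvInt2 ((PySem.List.pyGet? bl (j + 1)).getD [])))) (some 2) none)
            k))
      (pre ++ c :: rest)
    = pre ++ pvChain k c rest := by
  intro rest
  induction rest with
  | nil =>
    intro pre c
    rw [show ((pre.length : Int) + (([] : List (List Char)).length : Int)) = (pre.length : Int)
      from by simp]
    rw [PySem.List.pyRange_one_eq_nil le_rfl]
    simp [pvChain]
  | cons d t ih =>
    intro pre c
    rw [PySem.List.pyRange_one_cons
      (by simp only [List.length_cons]; push_cast; omega), List.foldl_cons]
    rw [PySem.List.pyGet?_append_length]
    rw [show ((pre.length : Int) + 1) = ((pre.length : Int) + ((1 : Nat) : Int)) from by simp,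
      PySem.List.pyGet?_append_right]
    simp only [List.getElem?_cons_succ, List.getElem?_cons_zero, Option.getD_some]
    rw [show ((pre.length : Int) + ((1 : Nat) : Int)).toNat = pre.length + 1 from by omega]
    rw [List.set_append, if_neg (by omega),
      show pre.length + 1 - pre.length = 1 from by omega,
      List.set_cons_succ, List.set_cons_zero]
    have hX : pvRjust (PySem.List.slice
        (PySem.Int.toBinChars0b (PySem.Int.bxor (pvInt2 c) (pvInt2 d))) (some 2) none) k
        = pvFmt k (PySem.Int.bxor (pvInt2 c) (pvInt2 d)) := rfl
    rw [hX]
    rw [show pre ++ c :: pvFmt k (PySem.Int.bxor (pvInt2 c) (pvInt2 d)) :: t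
        = (pre ++ [c]) ++ pvFmt k (PySem.Int.bxor (pvInt2 c) (pvInt2 d)) :: t from by simp]
    rw [show ((pre.length : Int) + ((1 : Nat) : Int)) = ((pre ++ [c]).length : Int) from by
      simp]
    rw [show ((pre.length : Int) + ((d :: t).length : Int))
        = ((pre ++ [c]).length : Int) + (t.length : Int) from by
      simp only [List.length_append, List.length_cons, List.length_nil]; push_cast; omega]
    rw [ih (pre ++ [c]) (pvFmt k (PySem.Int.bxor (pvInt2 c) (pvInt2 d)))]
    rw [show pvChain k c (d :: t)
        = c :: pvChain k (pvFmt k (PySem.Int.bxor (pvInt2 c) (pvInt2 d))) t from rfl]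
    simp
  

theorem pvChain_ne_nil (k : Int) (c : List Char) (rest : List (List Char)) :
    pvChain k c rest ≠ [] := by
  cases rest <;> simp [pvChain]

theorem pvChain_getLast (k : Int) : ∀ (rest : List (List Char)) (c : List Char),
    (pvChain k c rest).getLast? = some (pvChainLast k c rest) := by
  intro rest
  induction rest with
  | nil => intro c; rfl
  | cons d t ih =>
    intro c
    rw [show pvChain k c (d :: t)
        = c :: pvChain k (pvFmt k (PySem.Int.bxor (pvInt2 c) (pvInt2 d))) t from rfl]
    rw [List.getLast?_cons, ih]
    simp [pvChainLast]

theorem pvChainLast_eq (k : Int) : ∀ (rest : List (List Char)) (c : List Char), rest ≠ [] →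
    pvChainLast k c rest
      = pvFmt k (rest.foldl (fun x ch => PySem.Int.bxor x (pvInt2 ch)) (pvInt2 c)) := by
  intro rest
  induction rest with
  | nil => intro c h; exact absurd rfl h
  | cons d t ih =>
    intro c _
    rw [show pvChainLast k c (d :: t)
        = pvChainLast k (pvFmt k (PySem.Int.bxor (pvInt2 c) (pvInt2 d))) t from rfl]
    have hX : 0 ≤ PySem.Int.bxor (pvInt2 c) (pvInt2 d) :=
      pvBxor_nonneg (pvInt2_nonneg c) (pvInt2_nonneg d)
    cases t with
    | nil => simp [pvChainLast]
    | cons e t' =>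
      rw [ih _ (by simp)]
      rw [List.foldl_cons, pvInt2_pvFmt hX]
      simp only [List.foldl_cons]

-- ---- B's streaming pass equals the XOR fold over pvChunks ----

theorem pvStream_go (k : Int) (hk : 1 ≤ k) :
    ∀ (cs : List Char) (a v : Int) (c0 : Nat), c0 < k.toNat → c0 + cs.length ≤ k.toNat →
    cs.foldl
      (fun (t : Int × Int × Int) c =>
        let cur := t.2.1 * 2 + (if c = '1' then 1 else 0)
        let cnt := t.2.2 + 1
        if cnt = k then (PySem.Int.bxor t.1 cur, 0, 0) else (t.1, cur, cnt))
      (a, v, (c0 : Int))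
    = if c0 + cs.length = k.toNat then (PySem.Int.bxor a (cs.foldl pvBinF v), 0, 0)
      else (a, cs.foldl pvBinF v, ((c0 + cs.length : Nat) : Int)) := by
  intro cs
  induction cs with
  | nil =>
    intro a v c0 hc0 _
    simp only [List.length_nil, List.foldl_nil]
    rw [if_neg (by omega)]
    simp
  | cons c cs ih =>
    intro a v c0 hc0 hle
    simp only [List.length_cons] at hle ⊢
    simp only [List.foldl_cons]
    by_cases hK : c0 + 1 = k.toNat
    · have hcs : cs = [] := List.length_eq_zero_iff.mp (by omega)
      subst hcs
      rw [if_pos (show c0 + (([] : List Char).length + 1) = k.toNat from by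
            simp only [List.length_nil]; omega),
        if_pos (show ((c0 : Int) + 1) = k from by omega)]
      rfl
    · rw [if_neg (show ¬((c0 : Int) + 1) = k from by omega)]
      rw [show ((c0 : Int) + 1) = (((c0 + 1 : Nat)) : Int) from by push_cast; ring]
      rw [ih _ _ (c0 + 1) (by omega) (by omega)]
      by_cases hfin : c0 + (cs.length + 1) = k.toNat
      · rw [if_pos (show c0 + 1 + cs.length = k.toNat from by omega), if_pos hfin]
        rfl
      · rw [if_neg (show ¬ c0 + 1 + cs.length = k.toNat from by omega), if_neg hfin]
        rw [show c0 + 1 + cs.length = c0 + (cs.length + 1) from by omega]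
        rfl

theorem pvStream_chunks (k : Int) (hk : 1 ≤ k) :
    ∀ (s : List Char) (a : Int),
    (let st := s.foldl
        (fun (t : Int × Int × Int) c =>
          let cur := t.2.1 * 2 + (if c = '1' then 1 else 0)
          let cnt := t.2.2 + 1
          if cnt = k then (PySem.Int.bxor t.1 cur, 0, 0) else (t.1, cur, cnt))
        (a, 0, 0);
     if st.2.2 ≠ 0 then PySem.Int.bxor st.1 st.2.1 else st.1)
    = (pvChunks (k.toNat - 1) s).foldl (fun x c => PySem.Int.bxor x (pvInt2 c)) a := by
  have main : ∀ (n : Nat) (s : List Char), s.length ≤ n → ∀ a : Int,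
      (let st := s.foldl
          (fun (t : Int × Int × Int) c =>
            let cur := t.2.1 * 2 + (if c = '1' then 1 else 0)
            let cnt := t.2.2 + 1
            if cnt = k then (PySem.Int.bxor t.1 cur, 0, 0) else (t.1, cur, cnt))
          (a, 0, 0);
       if st.2.2 ≠ 0 then PySem.Int.bxor st.1 st.2.1 else st.1)
      = (pvChunks (k.toNat - 1) s).foldl (fun x c => PySem.Int.bxor x (pvInt2 c)) a := by
    intro n
    induction n with
    | zero =>
      intro s hs a
      have hs0 : s = [] := List.length_eq_zero_iff.mp (by omega)
      subst hs0
      simp [pvChunks]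
    | succ n ih =>
      intro s hs a
      cases s with
      | nil => simp [pvChunks]
      | cons c rest =>
        have hsplit : c :: rest
            = (c :: rest.take (k.toNat - 1)) ++ rest.drop (k.toNat - 1) := by
          rw [List.cons_append, List.take_append_drop]
        have hchunks : pvChunks (k.toNat - 1) (c :: rest)
            = (c :: rest.take (k.toNat - 1))
              :: pvChunks (k.toNat - 1) (rest.drop (k.toNat - 1)) := by
          rw [pvChunks]
        have htlen : (c :: rest.take (k.toNat - 1)).length ≤ k.toNat := by
          simp [List.length_take]; omega
        conv_lhs => rw [hsplit]
        rw [List.foldl_append]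
        have hgo := pvStream_go k hk (c :: rest.take (k.toNat - 1)) a 0 0 (by omega)
          (by simpa using htlen)
        simp only [Nat.cast_zero, zero_add] at hgo
        rw [hgo]
        by_cases hfull : (c :: rest.take (k.toNat - 1)).length = k.toNat
        · rw [if_pos hfull]
          rw [ih (rest.drop (k.toNat - 1)) (by simp at hs ⊢; omega)]
          rw [hchunks, List.foldl_cons]
          rfl
        · rw [if_neg hfull]
          have hrl : rest.length < k.toNat - 1 := by
            simp [List.length_take] at hfull htlen ⊢; omega
          have hdrop : rest.drop (k.toNat - 1) = [] := List.drop_eq_nil_of_le (by omega)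
          rw [hdrop]
          simp only [List.foldl_nil]
          rw [if_pos (show ¬ (((c :: rest.take (k.toNat - 1)).length : Nat) : Int) = 0 from by
            simp [List.length_take]; omega)]
          rw [hchunks, hdrop, List.foldl_cons]
          simp [pvChunks]
          rfl
  exact fun s a => main s.length s le_rfl a

-- ---- auxiliary pvChunks shape lemmas ----

theorem pvChunks_singleton {k' : Nat} {s : List Char} (hne : s ≠ []) (hlen : s.length ≤ k' + 1) :
    pvChunks k' s = [s] := by
  cases s with
  | nil => exact absurd rfl hne
  | cons c rest =>
    rw [pvChunks]
    simp at hlen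
    rw [List.take_of_length_le (by omega), List.drop_eq_nil_of_le (by omega)]
    simp [pvChunks]

theorem pvChunks_two {k' : Nat} {s : List Char} (hlen : k' + 1 < s.length) :
    ∃ c d t, pvChunks k' s = c :: d :: t := by
  cases s with
  | nil => simp at hlen
  | cons c rest =>
    rw [pvChunks]
    cases h : rest.drop k' with
    | nil =>
      exfalso
      have := List.drop_eq_nil_iff.mp h
      simp at hlen; omega
    | cons d' r' =>
      rw [pvChunks]
      exact ⟨_, _, _, rfl⟩

theorem pvFoldXor_nonneg : ∀ (L : List (List Char)) (a : Int), 0 ≤ a →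
    0 ≤ L.foldl (fun x c => PySem.Int.bxor x (pvInt2 c)) a := by
  intro L
  induction L with
  | nil => intro a ha; simpa using ha
  | cons c L ih =>
    intro a ha
    simp only [List.foldl_cons]
    exact ih _ (pvBxor_nonneg ha (pvInt2_nonneg c))

theorem pvPyGet_last {α : Type} (l : List α) (h : l ≠ []) :
    PySem.List.pyGet? l ((l.length : Int) - 1) = l.getLast? := by
  have hpos : 0 < l.length := List.length_pos_of_ne_nil h
  rw [show ((l.length : Int) - 1) = ((l.length - 1 : Nat) : Int) from by omega]
  rw [PySem.List.pyGet?_natCast, List.getLast?_eq_getElem?]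

-- ===== VERDICT (by name: the statement is the Claim_ definition above) =====
theorem folder_feature_spec : Claim_equal_folder_feature := by
  intro hf k hdom hpre
  obtain ⟨hge, hk⟩ := hpre
  obtain ⟨n, hP, hn⟩ : ∃ n, PySem.Int.ofStrBase? hf 16 = some n ∧ 0 ≤ n := by
    cases hP : PySem.Int.ofStrBase? hf 16 with
    | none => rw [hP] at hge; norm_num at hge
    | some n => exact ⟨n, rfl, by rw [hP] at hge; simpa using hge⟩
  show folder_feature hf k = folder_feature_alt hf k
  simp only [folder_feature, folder_feature_alt, hP, Option.getD_some]
  have hpre1 : pvRjust (PySem.List.slice (PySem.Int.toBinChars0b n) (some 2) none) 128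
      = PySem.Chars.zfill (PySem.Int.toBinChars n) 128 := by
    rw [pvSlice2_toBinChars0b hn]
    refine pvRjust_eq_zfill _ _ ?_ ?_
    · rw [pvToBinChars_of_nonneg hn]; exact pvMem_toDigitsCore _ _
    · rw [pvToBinChars_of_nonneg hn]; exact pvToDigitsCore_ne_nil _ _ (Nat.succ_pos _)
  rw [hpre1]
  set S : List Char := PySem.Chars.zfill (PySem.Int.toBinChars n) 128 ++ ['0', '0', '0', '0']
    with hS
  have hSne : S ≠ [] := by simp [hS]
  have hchfold := pvChunks_fold S k hk 0 []
  simp only [Nat.cast_zero, List.drop_zero, List.nil_append] at hchfold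
  rw [hchfold]
  by_cases hcase : (S.length : Int) ≤ k
  · have hsing : pvChunks (k.toNat - 1) S = [S] :=
      pvChunks_singleton hSne (by have := List.length_pos_of_ne_nil hSne; omega)
    rw [hsing, if_pos hcase]
    rw [show (([S].length : Int) - 1) = 0 from by simp]
    rw [PySem.List.pyRange_one_eq_nil le_rfl]
    simp only [List.foldl_nil]
    rw [pvPyGet_last _ (show ([S] : List (List Char)) ≠ [] from by simp)]
    simp
  · rw [if_neg hcase]
    obtain ⟨c, d, t, hcdt⟩ := pvChunks_two (k' := k.toNat - 1) (s := S) (by omega)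
    rw [hcdt]
    have hloop := pvLoop_go k (d :: t) [] c
    simp only [List.length_nil, Nat.cast_zero, zero_add, List.nil_append] at hloop
    rw [show (((c :: d :: t : List (List Char)).length : Int) - 1)
        = (((d :: t : List (List Char)).length : Nat) : Int) from by simp]
    rw [hloop]
    rw [pvPyGet_last _ (pvChain_ne_nil k c (d :: t)), pvChain_getLast, Option.getD_some]
    rw [pvChainLast_eq k (d :: t) c (by simp)]
    have hXA : 0 ≤ (d :: t).foldl (fun x ch => PySem.Int.bxor x (pvInt2 ch)) (pvInt2 c) :=
      pvFoldXor_nonneg (d :: t) _ (pvInt2_nonneg c)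
    rw [pvFmt_eq_zfill hXA]
    set st := S.foldl
        (fun (t : Int × Int × Int) c =>
          let cur := t.2.1 * 2 + (if c = '1' then 1 else 0)
          let cnt := t.2.2 + 1
          if cnt = k then (PySem.Int.bxor t.1 cur, 0, 0) else (t.1, cur, cnt))
        (0, 0, 0) with hst
    have hstream : (if st.2.2 ≠ 0 then PySem.Int.bxor st.1 st.2.1 else st.1)
        = (pvChunks (k.toNat - 1) S).foldl (fun x c => PySem.Int.bxor x (pvInt2 c)) 0 :=
      pvStream_chunks k hk S 0
    rw [hstream, hcdt]
    simp only [List.foldl_cons]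
    rw [pvBxor_zero_left (pvInt2_nonneg c)]
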